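-- pv_equiv track=rewrite | github.com/jcb960/Memories | src/KdataFunctions.py | ongoingSelections
-- ===== SOURCE A (Python) =====
-- def ongoingSelections(allPicksS, indexesUsed, setShuffled): #On going selections is the function used in game, and during games
--     cardsNotUsed=[]
--     for card in allPicksS:
--         if card not in indexesUsed:
--             cardsNotUsed.append(card)
--
--     fullSelections=[]
--     for firstCardIndex in range(len(cardsNotUsed)):
--         firstCard=cardsNotUsed[firstCardIndex]
--         singleSelections=[firstCard]
--
--         for secondCardIndex in range(len(cardsNotUsed)):
--             if firstCardIndex!=secondCardIndex:
--                 secondCard=cardsNotUsed[secondCardIndex]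
--
--                 gameCard1=setShuffled[firstCard-1]
--                 gameCard2=setShuffled[secondCard-1]
--
--                 if gameCard1[:-1]==gameCard2[:-1]:
--                     singleSelections.append(secondCard)
--         singleSelections.sort() #Same reason as mentioned before
--
--         if singleSelections not in fullSelections:
--             fullSelections.append(singleSelections)
--     return fullSelections
-- ===== SOURCE B (Python) =====
-- def ongoingSelections(allPicksS, indexesUsed, setShuffled):
--     used = set(indexesUsed)
--     cardsNotUsed = [c for c in allPicksS if c not in used]
--     if len(cardsNotUsed) < 2:
--         # a lone card (or none) has no partner to compare with
--         return [[c] for c in cardsNotUsed]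
--
--     groups = {}
--     for c in cardsNotUsed:
--         groups.setdefault(setShuffled[c - 1][:-1], []).append(c)
--     for key in groups:
--         groups[key].sort()
--
--     fullSelections = []
--     seenKeys = set()
--     for c in cardsNotUsed:
--         key = setShuffled[c - 1][:-1]
--         if key not in seenKeys:
--             seenKeys.add(key)
--             fullSelections.append(groups[key])
--     return fullSelections
-- ===== Notes on version B (the rewrite author's own statement) =====
-- stated objective: alternative
-- what changed: Replaces A's all-pairs prefix comparison over unused cards by one dict pass grouping them by their shuffled-string prefix, sorting each group once, and emitting distinct groups by first-seen key (with a trivial base case when fewer than two cards are unused); asymptotically O(n log n) in the unused-card count versus A's O(n^2), though a timing run's timing family shows no measured speed-up.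
import Mathlib
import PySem

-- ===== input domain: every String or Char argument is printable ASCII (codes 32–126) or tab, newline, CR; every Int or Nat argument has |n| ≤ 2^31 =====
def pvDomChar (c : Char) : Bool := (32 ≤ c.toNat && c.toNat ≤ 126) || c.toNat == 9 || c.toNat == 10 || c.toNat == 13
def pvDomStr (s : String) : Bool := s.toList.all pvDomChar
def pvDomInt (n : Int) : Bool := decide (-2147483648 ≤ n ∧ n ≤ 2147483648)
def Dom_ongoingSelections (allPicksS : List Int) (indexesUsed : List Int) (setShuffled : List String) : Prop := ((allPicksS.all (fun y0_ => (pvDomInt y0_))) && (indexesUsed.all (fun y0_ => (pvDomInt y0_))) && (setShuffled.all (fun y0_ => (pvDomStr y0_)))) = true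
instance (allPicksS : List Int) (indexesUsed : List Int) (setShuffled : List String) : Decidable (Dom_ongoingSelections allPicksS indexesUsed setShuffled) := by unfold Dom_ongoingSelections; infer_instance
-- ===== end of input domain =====

-- B groups unused cards by shuffled-value prefix in one dict pass instead of A's all-pairs scan (a different algorithm; no speed-up measured on the timing inputs).

-- ===== PORT A =====
-- setShuffled[card-1][:-1], the value both Pythons key on (A computes it inline in the inner loop)
def gameKey (setShuffled : List String) (card : Int) : String :=
  PySem.Str.slice (PySem.List.pyGetD setShuffled (card - 1) "") none (some (-1))

def ongoingSelections (allPicksS : List Int) (indexesUsed : List Int) (setShuffled : List String) : List (List Int) :=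
  let cardsNotUsed := allPicksS.foldl (fun acc card =>
    if indexesUsed.contains card then acc else acc ++ [card]) []
  (PySem.List.enumerate cardsNotUsed 0).foldl (fun fullSelections p =>
    let firstCard := p.2
    let singleSelections := (PySem.List.enumerate cardsNotUsed 0).foldl (fun ss q =>
      if p.1 ≠ q.1 then
        if gameKey setShuffled firstCard == gameKey setShuffled q.2 then ss ++ [q.2] else ss
      else ss) [firstCard]
    let singleSorted := PySem.List.sorted singleSelections (fun x => x) false
    if fullSelections.contains singleSorted then fullSelections
    else fullSelections ++ [singleSorted]) []

-- ===== PORT B =====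
-- the dict-grouping path of B, taken when at least two cards are unused
def ongoingSelectionsGroups (cardsNotUsed : List Int) (setShuffled : List String) : List (List Int) :=
  let groups := cardsNotUsed.foldl (fun d c =>
    PySem.Dict.modify d (gameKey setShuffled c) [] (fun g => g ++ [c]))
    (PySem.Dict.empty : PySem.Dict String (List Int))
  let groups2 := (PySem.Dict.keys groups).foldl (fun d k =>
    PySem.Dict.insert d k (PySem.List.sorted (PySem.Dict.getD d k []) (fun x => x) false)) groups
  let st := cardsNotUsed.foldl (fun (st : List (List Int) × PySem.Set String) c =>
    let key := gameKey setShuffled c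
    if PySem.Set.contains st.2 key then st
    else (st.1 ++ [PySem.Dict.getD groups2 key []], PySem.Set.add st.2 key)) ([], PySem.Set.empty)
  st.1

def ongoingSelections_alt (allPicksS : List Int) (indexesUsed : List Int) (setShuffled : List String) : List (List Int) :=
  let used : PySem.Set Int := PySem.Set.ofList indexesUsed
  let cardsNotUsed := allPicksS.filter (fun c => !(PySem.Set.contains used c))
  if cardsNotUsed.length < 2 then cardsNotUsed.map (fun c => [c])
  else ongoingSelectionsGroups cardsNotUsed setShuffled

-- ===== PRECONDITION & SPEC =====
-- Pre_ excludes exactly the inputs on which A raises IndexError: those with at least two unused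
-- cards of which some card-1 indexes setShuffled out of range (with fewer than two unused cards
-- A never indexes setShuffled and returns normally; such inputs stay inside Pre_).
def Pre_ongoingSelections (allPicksS : List Int) (indexesUsed : List Int) (setShuffled : List String) : Prop :=
  2 ≤ (allPicksS.filter (fun c => c ∉ indexesUsed)).length →
    ∀ card ∈ allPicksS, card ∉ indexesUsed → PySem.Raise.InRange setShuffled.length (card - 1)
instance (allPicksS : List Int) (indexesUsed : List Int) (setShuffled : List String) : Decidable (Pre_ongoingSelections allPicksS indexesUsed setShuffled) := by unfold Pre_ongoingSelections; infer_instance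

def pvWitness_ongoingSelections : List Int × List Int × List String := ([1, 2, 3], [2], ["ab", "ac", "b"])

def Spec_ongoingSelections (allPicksS : List Int) (indexesUsed : List Int) (setShuffled : List String) (out : List (List Int)) : Prop := out = ongoingSelections_alt allPicksS indexesUsed setShuffled
instance (allPicksS : List Int) (indexesUsed : List Int) (setShuffled : List String) (out : List (List Int)) : Decidable (Spec_ongoingSelections allPicksS indexesUsed setShuffled out) := by unfold Spec_ongoingSelections; infer_instance

-- ===== CLAIM (what is proved, stated in full; the proofs are below) =====
def Claim_equal_ongoingSelections : Prop := ∀ (allPicksS : List Int) (indexesUsed : List Int) (setShuffled : List String), Dom_ongoingSelections allPicksS indexesUsed setShuffled → Pre_ongoingSelections allPicksS indexesUsed setShuffled → Spec_ongoingSelections allPicksS indexesUsed setShuffled (ongoingSelections allPicksS indexesUsed setShuffled)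

-- ===== LEMMAS AND PROOFS =====

-- the two builds of cardsNotUsed agree
theorem notUsed_eq (allPicksS indexesUsed : List Int) :
    allPicksS.foldl (fun acc card => if indexesUsed.contains card then acc else acc ++ [card]) []
    = allPicksS.filter (fun c => !(PySem.Set.contains (PySem.Set.ofList indexesUsed) c)) := by
  rw [PySem.List.foldl_congr_mem allPicksS _
      (fun acc card => if !(indexesUsed.contains card) then acc ++ [card] else acc) []
      (by intro acc x _; by_cases h : x ∈ indexesUsed <;> simp [h])]
  rw [PySem.List.foldl_append_if_eq_filter, List.nil_append]
  apply List.filter_congr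
  intro c _
  simp [PySem.Set.contains_eq_listContains, PySem.Set.mem_ofList]

-- grouping pass: the dict's entry at `key` collects, in order, the cards whose gameKey is `key`
theorem groups_getD (ss : List String) (xs : List Int) (d : PySem.Dict String (List Int)) (key : String) :
    PySem.Dict.getD (xs.foldl (fun d c => PySem.Dict.modify d (gameKey ss c) [] (fun g => g ++ [c])) d) key []
    = PySem.Dict.getD d key [] ++ xs.filter (fun c => gameKey ss c == key) := by
  induction xs generalizing d with
  | nil => simp
  | cons c xs ih =>
    rw [List.foldl_cons, ih, PySem.Dict.getD_modify]
    by_cases h : gameKey ss c = key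
    · simp [h, List.append_assoc]
    · have h2 : ¬ key = gameKey ss c := fun hh => h (Eq.symm hh)
      simp [h, h2]

theorem groups_keys_nodup (ss : List String) (xs : List Int) (d : PySem.Dict String (List Int))
    (hd : (PySem.Dict.keys d).Nodup) :
    (PySem.Dict.keys (xs.foldl (fun d c => PySem.Dict.modify d (gameKey ss c) [] (fun g => g ++ [c])) d)).Nodup := by
  induction xs generalizing d with
  | nil => exact hd
  | cons c xs ih =>
    rw [List.foldl_cons]
    apply ih
    rw [PySem.Dict.keys_modify]
    exact PySem.Dict.nodup_keys_insert _ _ _ hd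

-- sorting pass: afterwards the entry at a key in ks is sorted, others untouched
theorem sortPass_getD (ks : List String) (d : PySem.Dict String (List Int)) (key : String) (hk : ks.Nodup) :
    PySem.Dict.getD (ks.foldl (fun d k =>
        PySem.Dict.insert d k (PySem.List.sorted (PySem.Dict.getD d k []) (fun x => x) false)) d) key []
    = if key ∈ ks then PySem.List.sorted (PySem.Dict.getD d key []) (fun x => x) false
      else PySem.Dict.getD d key [] := by
  induction ks generalizing d with
  | nil => simp
  | cons k ks ih =>
    rw [List.foldl_cons, ih _ hk.of_cons]
    have hkk : k ∉ ks := (List.nodup_cons.mp hk).1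
    by_cases hmem : key ∈ ks
    · have hne : key ≠ k := fun h => hkk (h ▸ hmem)
      simp [hmem, hne, PySem.Dict.getD_insert]
    · by_cases hk2 : key = k
      · simp [hk2]
      · simp [hmem, hk2, PySem.Dict.getD_insert]

-- snd of a filter-by-snd over an enumeration is a plain filter
theorem enum_filter_snd (P : Int → Bool) (X : List Int) (s : Int) :
    (((PySem.List.enumerate X s).filter (fun q => P q.2)).map Prod.snd) = X.filter P := by
  induction X generalizing s with
  | nil => simp [PySem.List.enumerate_nil]
  | cons x xs ih =>
    rw [PySem.List.enumerate_cons]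
    cases h : P x <;> simp [h, ih]

-- A's inner loop, sorted, equals the sorted group of cards sharing c's gameKey
theorem inner_sorted (ss : List String) (L1 L2 : List Int) (c : Int) (j : Int) (hj : j = (L1.length : Int)) :
    PySem.List.sorted ((PySem.List.enumerate (L1 ++ c :: L2) 0).foldl
      (fun acc q => if j ≠ q.1 then
        (if gameKey ss c == gameKey ss q.2 then acc ++ [q.2] else acc) else acc) [c]) (fun x => x) false
    = PySem.List.sorted ((L1 ++ c :: L2).filter (fun d => gameKey ss c == gameKey ss d)) (fun x => x) false := by
  apply (PySem.List.sorted_id_eq_sorted_id_iff_perm _ _).mpr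
  rw [PySem.List.foldl_congr_mem _ _
      (fun acc q => if (decide (j ≠ q.1) && (gameKey ss c == gameKey ss q.2)) then acc ++ [q.2] else acc) [c]
      (by
        intro acc q _
        by_cases h1 : j ≠ q.1 <;> cases h2 : (gameKey ss c == gameKey ss q.2) <;> simp [h1, h2])]
  rw [PySem.List.foldl_append_if]
  rw [PySem.List.enumerate_append, PySem.List.enumerate_cons]
  rw [List.filter_append, List.filter_cons]
  have hmid : (decide (j ≠ ((0 : Int) + (L1.length : Int), c).1) &&
      (gameKey ss c == gameKey ss ((0 : Int) + (L1.length : Int), c).2)) = false := by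
    simp [hj]
  rw [hmid]
  have h1 : (PySem.List.enumerate L1 0).filter
      (fun q => decide (j ≠ q.1) && (gameKey ss c == gameKey ss q.2))
      = (PySem.List.enumerate L1 0).filter (fun q => gameKey ss c == gameKey ss q.2) := by
    apply List.filter_congr
    intro q hq
    obtain ⟨k, hk, rfl⟩ := (PySem.List.mem_enumerate_iff _ _ _).mp hq
    have hd : decide (j ≠ ((0 : Int) + (k : Int), L1[k]).1) = true := by
      simp only [decide_eq_true_eq]; omega
    rw [hd, Bool.true_and]
  have h2 : (PySem.List.enumerate L2 ((0 : Int) + (L1.length : Int) + 1)).filter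
      (fun q => decide (j ≠ q.1) && (gameKey ss c == gameKey ss q.2))
      = (PySem.List.enumerate L2 ((0 : Int) + (L1.length : Int) + 1)).filter
          (fun q => gameKey ss c == gameKey ss q.2) := by
    apply List.filter_congr
    intro q hq
    obtain ⟨k, hk, rfl⟩ := (PySem.List.mem_enumerate_iff _ _ _).mp hq
    have hd : decide (j ≠ ((0 : Int) + (L1.length : Int) + 1 + (k : Int), L2[k]).1) = true := by
      simp only [decide_eq_true_eq]; omega
    rw [hd, Bool.true_and]
  rw [h1, h2]
  simp only [Bool.false_eq_true, if_false]
  rw [List.map_append, enum_filter_snd (fun d => gameKey ss c == gameKey ss d),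
      enum_filter_snd (fun d => gameKey ss c == gameKey ss d)]
  have hc : (gameKey ss c == gameKey ss c) = true := by simp
  rw [List.filter_append, List.filter_cons]
  simp only [hc, if_true]
  simpa using List.perm_middle.symm

-- B's dict lookup for a card in L is the sorted group of cards sharing its gameKey
theorem b_group (ss : List String) (L : List Int) (c : Int) (hc : c ∈ L)
    (groups : PySem.Dict String (List Int))
    (hg : groups = L.foldl (fun d c =>
        PySem.Dict.modify d (gameKey ss c) [] (fun g => g ++ [c]))
        (PySem.Dict.empty : PySem.Dict String (List Int))) :
    PySem.Dict.getD ((PySem.Dict.keys groups).foldl (fun d k =>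
        PySem.Dict.insert d k (PySem.List.sorted (PySem.Dict.getD d k []) (fun x => x) false)) groups)
        (gameKey ss c) []
    = PySem.List.sorted (L.filter (fun d => gameKey ss d == gameKey ss c)) (fun x => x) false := by
  subst hg
  have hget : PySem.Dict.getD (L.foldl (fun d c =>
        PySem.Dict.modify d (gameKey ss c) [] (fun g => g ++ [c]))
        (PySem.Dict.empty : PySem.Dict String (List Int))) (gameKey ss c) []
      = L.filter (fun d => gameKey ss d == gameKey ss c) := by
    simpa using groups_getD ss L PySem.Dict.empty (gameKey ss c)
  have hne : PySem.Dict.getD (L.foldl (fun d c =>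
        PySem.Dict.modify d (gameKey ss c) [] (fun g => g ++ [c]))
        (PySem.Dict.empty : PySem.Dict String (List Int))) (gameKey ss c) [] ≠ [] := by
    rw [hget]
    intro h
    have hmemf : c ∈ L.filter (fun d => gameKey ss d == gameKey ss c) :=
      List.mem_filter.mpr ⟨hc, by simp⟩
    rw [h] at hmemf
    exact absurd hmemf (List.not_mem_nil)
  have hcontains : PySem.Dict.contains (L.foldl (fun d c =>
        PySem.Dict.modify d (gameKey ss c) [] (fun g => g ++ [c]))
        (PySem.Dict.empty : PySem.Dict String (List Int))) (gameKey ss c) = true := by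
    cases hco : PySem.Dict.contains (L.foldl (fun d c =>
        PySem.Dict.modify d (gameKey ss c) [] (fun g => g ++ [c]))
        (PySem.Dict.empty : PySem.Dict String (List Int))) (gameKey ss c)
    · exact absurd (PySem.Dict.getD_of_not_contains _ [] hco) hne
    · rfl
  have hmem : gameKey ss c ∈ PySem.Dict.keys (L.foldl (fun d c =>
        PySem.Dict.modify d (gameKey ss c) [] (fun g => g ++ [c]))
        (PySem.Dict.empty : PySem.Dict String (List Int))) :=
    (PySem.Dict.contains_iff_mem_keys _ _).mp hcontains
  rw [sortPass_getD _ _ _ (groups_keys_nodup ss L PySem.Dict.empty PySem.Dict.nodup_keys_empty)]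
  rw [if_pos hmem, hget]

-- two sorted groups are equal exactly when their cards' gameKeys are equal
set_option maxHeartbeats 1000000 in
theorem group_eq_iff (ss : List String) (L : List Int) (c c' : Int) (hc : c ∈ L) :
    PySem.List.sorted (L.filter (fun d => gameKey ss c == gameKey ss d)) (fun x => x) false
      = PySem.List.sorted (L.filter (fun d => gameKey ss c' == gameKey ss d)) (fun x => x) false
    ↔ gameKey ss c = gameKey ss c' := by
  constructor
  · intro h
    have h1 : c ∈ PySem.List.sorted (L.filter (fun d => gameKey ss c == gameKey ss d)) (fun x => x) false :=
      (PySem.List.mem_sorted _ _ _ _).mpr (List.mem_filter.mpr ⟨hc, by simp⟩)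
    rw [h] at h1
    have h2 := (List.mem_filter.mp ((PySem.List.mem_sorted _ _ _ _).mp h1)).2
    exact (eq_of_beq h2).symm
  · intro h
    congr 1
    apply List.filter_congr
    intro d _
    rw [h]

-- B's key-seen dedup fold equals A's value-membership dedup fold, given that
-- group value and key determine each other
theorem dedup_key_fold (K : Int → String) (G : Int → List Int) (L : List Int)
    (fs : List (List Int)) (seen : PySem.Set String)
    (hinj : ∀ c ∈ L, ∀ c' ∈ L, (G c = G c' ↔ K c = K c'))
    (hinv : ∀ c ∈ L, (K c ∈ seen ↔ G c ∈ fs)) :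
    (L.foldl (fun st c =>
        if PySem.Set.contains st.2 (K c) then st
        else (st.1 ++ [G c], PySem.Set.add st.2 (K c))) (fs, seen)).1
    = L.foldl (fun fs c => if fs.contains (G c) then fs else fs ++ [G c]) fs := by
  induction L generalizing fs seen with
  | nil => rfl
  | cons c L ih =>
    rw [List.foldl_cons, List.foldl_cons]
    by_cases h : K c ∈ seen
    · have hg : G c ∈ fs := (hinv c (List.mem_cons_self)).mp h
      have hb : fs.contains (G c) = true := by simpa using hg
      have hs : PySem.Set.contains seen (K c) = true := by simpa using h
      simp only [hs, hb, if_true]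
      exact ih fs seen (fun a ha b hb => hinj a (List.mem_cons_of_mem _ ha) b (List.mem_cons_of_mem _ hb))
        (fun a ha => hinv a (List.mem_cons_of_mem _ ha))
    · have hg : G c ∉ fs := fun hin => h ((hinv c (List.mem_cons_self)).mpr hin)
      have hb : fs.contains (G c) = false := by simpa using hg
      have hs : PySem.Set.contains seen (K c) = false := by simpa using h
      simp only [hs, hb, if_false, Bool.false_eq_true]
      rw [PySem.Set.add_of_not_mem h]
      refine ih (fs ++ [G c]) (seen ++ [K c])
        (fun a ha b hb => hinj a (List.mem_cons_of_mem _ ha) b (List.mem_cons_of_mem _ hb)) ?_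
      intro a ha
      rw [List.mem_append, List.mem_append, List.mem_singleton, List.mem_singleton]
      constructor
      · rintro (h1 | h2)
        · exact Or.inl ((hinv a (List.mem_cons_of_mem _ ha)).mp h1)
        · exact Or.inr ((hinj a (List.mem_cons_of_mem _ ha) c List.mem_cons_self).mpr h2)
      · rintro (h1 | h2)
        · exact Or.inl ((hinv a (List.mem_cons_of_mem _ ha)).mpr h1)
        · exact Or.inr ((hinj a (List.mem_cons_of_mem _ ha) c List.mem_cons_self).mp h2)

-- inner_sorted, restated at position k of L
theorem inner_sorted' (ss : List String) (L : List Int) (k : Nat) (c : Int)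
    (hk : k < L.length) (hc : L[k] = c) :
    PySem.List.sorted ((PySem.List.enumerate L 0).foldl
      (fun acc q => if ((0 : Int) + (k : Int)) ≠ q.1 then
        (if gameKey ss c == gameKey ss q.2 then acc ++ [q.2] else acc) else acc) [c]) (fun x => x) false
    = PySem.List.sorted (L.filter (fun d => gameKey ss c == gameKey ss d)) (fun x => x) false := by
  have hL : L = L.take k ++ c :: L.drop (k + 1) := by
    conv_lhs => rw [← List.take_append_drop k L, List.drop_eq_getElem_cons hk, hc]
  rw [hL]
  exact inner_sorted ss (L.take k) (L.drop (k + 1)) c ((0 : Int) + (k : Int))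
    (by simp [List.length_take, Nat.min_eq_left (Nat.le_of_lt hk)])

-- fold over an enumeration whose body only uses the element equals the fold over the list
theorem foldl_enum_snd {β : Type} (L : List Int) (h : β → Int → β) (init : β) :
    (PySem.List.enumerate L 0).foldl (fun acc p => h acc p.2) init = L.foldl h init := by
  conv_rhs => rw [← PySem.List.map_snd_enumerate L 0]
  rw [List.foldl_map]

-- A's outer loop over L equals B's grouping path over the same L (no length hypothesis needed)
set_option maxHeartbeats 2000000 in
theorem a_body_eq_groups (setShuffled : List String) (L : List Int) :
    (PySem.List.enumerate L 0).foldl (fun fullSelections p =>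
      let firstCard := p.2
      let singleSelections := (PySem.List.enumerate L 0).foldl (fun ss q =>
        if p.1 ≠ q.1 then
          if gameKey setShuffled firstCard == gameKey setShuffled q.2 then ss ++ [q.2] else ss
        else ss) [firstCard]
      let singleSorted := PySem.List.sorted singleSelections (fun x => x) false
      if fullSelections.contains singleSorted then fullSelections
      else fullSelections ++ [singleSorted]) []
    = ongoingSelectionsGroups L setShuffled := by
  unfold ongoingSelectionsGroups
  dsimp only
  have hmain : ∀ c ∈ L, PySem.Dict.getD
      ((PySem.Dict.keys (L.foldl (fun d c =>
          PySem.Dict.modify d (gameKey setShuffled c) [] (fun g => g ++ [c]))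
          (PySem.Dict.empty : PySem.Dict String (List Int)))).foldl (fun d k =>
        PySem.Dict.insert d k (PySem.List.sorted (PySem.Dict.getD d k []) (fun x => x) false))
        (L.foldl (fun d c =>
          PySem.Dict.modify d (gameKey setShuffled c) [] (fun g => g ++ [c]))
          (PySem.Dict.empty : PySem.Dict String (List Int))))
      (gameKey setShuffled c) []
      = PySem.List.sorted (L.filter (fun d => gameKey setShuffled c == gameKey setShuffled d)) (fun x => x) false := by
    intro c hc
    rw [b_group setShuffled L c hc _ rfl]
    congr 1
    apply List.filter_congr
    intro d _
    simp [eq_comm]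
  refine Eq.trans ?_
    (dedup_key_fold (fun c => gameKey setShuffled c)
      (fun c => PySem.Dict.getD
        ((PySem.Dict.keys (L.foldl (fun d c =>
            PySem.Dict.modify d (gameKey setShuffled c) [] (fun g => g ++ [c]))
            (PySem.Dict.empty : PySem.Dict String (List Int)))).foldl (fun d k =>
          PySem.Dict.insert d k (PySem.List.sorted (PySem.Dict.getD d k []) (fun x => x) false))
          (L.foldl (fun d c =>
            PySem.Dict.modify d (gameKey setShuffled c) [] (fun g => g ++ [c]))
            (PySem.Dict.empty : PySem.Dict String (List Int))))
        (gameKey setShuffled c) []) L [] []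
      (by
        intro a ha b hb
        dsimp only
        rw [hmain a ha, hmain b hb]
        exact group_eq_iff setShuffled L a b ha)
      (by intro a _; simp)).symm
  rw [PySem.List.foldl_congr_mem (PySem.List.enumerate L 0) _
      (fun fs p => if fs.contains (PySem.List.sorted (L.filter
          (fun d => gameKey setShuffled p.2 == gameKey setShuffled d)) (fun x => x) false) then fs
        else fs ++ [PySem.List.sorted (L.filter
          (fun d => gameKey setShuffled p.2 == gameKey setShuffled d)) (fun x => x) false]) []
      (by
        intro fs p hp
        obtain ⟨k, hk, rfl⟩ := (PySem.List.mem_enumerate_iff _ _ _).mp hp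
        dsimp only
        rw [inner_sorted' setShuffled L k (L[k]) hk rfl])]
  rw [foldl_enum_snd L (fun fs c => if fs.contains (PySem.List.sorted (L.filter
          (fun d => gameKey setShuffled c == gameKey setShuffled d)) (fun x => x) false) then fs
        else fs ++ [PySem.List.sorted (L.filter
          (fun d => gameKey setShuffled c == gameKey setShuffled d)) (fun x => x) false]) []]
  apply PySem.List.foldl_congr_mem
  intro fs c hcL
  rw [hmain c hcL]

-- ===== VERDICT (by name: the statement is the Claim_ definition above) =====
theorem ongoingSelections_spec : Claim_equal_ongoingSelections := by
  intro allPicksS indexesUsed setShuffled _ _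
  unfold Spec_ongoingSelections ongoingSelections ongoingSelections_alt
  rw [notUsed_eq]
  dsimp only
  generalize List.filter (fun c => !(PySem.Set.ofList indexesUsed).contains c) allPicksS = L
  match L with
  | [] => simp [PySem.List.enumerate_nil]
  | [c] =>
    simp only [List.length_cons, List.length_nil]
    rw [if_pos (by omega)]
    simp [PySem.List.enumerate_cons, PySem.List.enumerate_nil, PySem.List.sorted, PySem.List.insertBy]
  | c :: d :: rest =>
    rw [if_neg (by simp only [List.length_cons]; omega)]
    exact a_body_eq_groups setShuffled (c :: d :: rest)
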